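-- pv_equiv track=rewrite | github.com/RandyAnanda2003/tokped-summarizer-UI | scrap_orcess.py | remove_repeated_phrases
-- ===== SOURCE A (Python) =====
-- def remove_repeated_phrases(text, min_phrase_len=2):
--         words = text.split()
--         n = len(words)
--
--         result = []
--         i = 0
--
--         while i < n:
--             found = False
--
--             for size in range(min_phrase_len, (n - i) // 2 + 1):
--                 phrase = words[i:i + size]
--
--                 repeat = 1
--                 while words[i + size * repeat:i + size * (repeat + 1)] == phrase:
--                     repeat += 1
--
--                 if repeat > 1:
--                     result.extend(phrase)
--                     i += size * repeat
--                     found = True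
--                     break
--
--             if not found:
--                 result.append(words[i])
--                 i += 1
--
--         return " ".join(result)
-- ===== SOURCE B (Python) =====
-- def remove_repeated_phrases(text, min_phrase_len=2):
--     # Works on the remaining suffix of the word list directly: the candidate
--     # phrase is stripped off the front of the rest repeatedly (rest = rest[size:])
--     # instead of comparing slices at computed offsets i+size*repeat; index-free.
--     ws = text.split()
--     out = []
--     while ws:
--         for size in range(min_phrase_len, len(ws) // 2 + 1):
--             phrase = ws[:size]
--             rest = ws[size:]
--             while rest[:size] == phrase:
--                 rest = rest[size:]
--             if len(rest) + 2 * size <= len(ws):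
--                 out += phrase
--                 ws = rest
--                 break
--         else:
--             out.append(ws[0])
--             ws = ws[1:]
--     return " ".join(out)
-- ===== Notes on version B (the rewrite author's own statement) =====
-- stated objective: alternative
-- what changed: B is index-free: it walks the remaining suffix of the word list directly, detecting a repetition by repeatedly stripping the candidate phrase off the front of the rest (rest = rest[size:]) and comparing what was consumed, instead of A's slice comparisons at computed offsets i+size*repeat with an index/repeat-count bookkeeping.
import Mathlib
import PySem

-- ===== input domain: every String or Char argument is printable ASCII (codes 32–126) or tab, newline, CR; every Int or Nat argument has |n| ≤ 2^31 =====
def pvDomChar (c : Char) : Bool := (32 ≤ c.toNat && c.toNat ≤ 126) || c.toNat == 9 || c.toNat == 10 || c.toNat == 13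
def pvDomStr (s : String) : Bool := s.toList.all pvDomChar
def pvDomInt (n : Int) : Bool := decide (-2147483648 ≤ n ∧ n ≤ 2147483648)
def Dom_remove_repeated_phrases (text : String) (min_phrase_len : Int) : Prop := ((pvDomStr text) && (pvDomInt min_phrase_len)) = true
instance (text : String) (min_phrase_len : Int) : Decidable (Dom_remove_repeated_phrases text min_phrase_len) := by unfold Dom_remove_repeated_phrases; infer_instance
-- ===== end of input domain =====

-- B walks the remaining suffix of the word list directly, detecting a repetition by
-- stripping the candidate phrase off the front (rest = rest[size:]) instead of A's
-- slice comparisons at computed offsets; same greedy result (objective: alternative).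

-- ===== PORT A =====
-- Python's inner `while words[i+size*repeat:i+size*(repeat+1)] == phrase: repeat += 1`.
-- The fuel argument only makes the recursion total; inside Pre_ (size ≥ 1) the loop runs
-- at most words.length times, so fuel = words.length + 1 never runs out.
def pvARepeat (words : List String) (i size : Int) (phrase : List String) : Nat → Int → Int
  | 0, r => r
  | fuel+1, r =>
    if PySem.List.slice words (some (i + size * r)) (some (i + size * (r + 1))) = phrase then
      pvARepeat words i size phrase fuel (r + 1)
    else r

-- Python's `for size in range(...): ... if repeat > 1: ... break` — first size that repeats.
def pvAFind (words : List String) (i : Int) : List Int → Option (List String × Int)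
  | [] => none
  | size :: rest =>
    let phrase := PySem.List.slice words (some i) (some (i + size))
    let r := pvARepeat words i size phrase (words.length + 1) 1
    if 1 < r then some (phrase, i + size * r) else pvAFind words i rest

-- Python's outer `while i < n` loop; fuel = words.length + 1 suffices inside Pre_ because i
-- strictly increases each iteration.  `pyGetD … ""` is words[i], always in range when reached.
def pvALoop (words : List String) (minLen : Int) : Nat → Int → List String → List String
  | 0, _, res => res
  | fuel+1, i, res =>
    if i < (words.length : Int) then
      match pvAFind words i (PySem.List.pyRange minLen (PySem.Int.floordiv ((words.length : Int) - i) 2 + 1) 1) with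
      | some (phrase, i') => pvALoop words minLen fuel i' (res ++ phrase)
      | none => pvALoop words minLen fuel (i + 1) (res ++ [PySem.List.pyGetD words i ""])
    else res

def remove_repeated_phrases (text : String) (min_phrase_len : Int) : String :=
  let words := PySem.Str.split₀ text
  PySem.Str.join " " (pvALoop words min_phrase_len (words.length + 1) 0 [])

-- ===== PORT B =====
-- Source B's `while rest[:size] == phrase: rest = rest[size:]` strip loop.  The extra
-- `rest ≠ [] ∧ 0 < s` guard only makes the recursion total: whenever it fails while
-- `rest.take s = phrase` holds, the Python loop never terminates (phrase = [] there),
-- so inside Pre_ the guard is never the deciding condition.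
def pvStrip (phrase : List String) (s : Nat) (rest : List String) : List String :=
  if hg : rest ≠ [] ∧ 0 < s ∧ rest.take s = phrase then pvStrip phrase s (rest.drop s) else rest
termination_by rest.length
decreasing_by
  have : 0 < rest.length := List.length_pos_of_ne_nil hg.1
  simp only [List.length_drop]
  omega

-- Source B's `range(min_phrase_len, len(ws) // 2 + 1)` over the current suffix, as Nats.
def pvBSizes (ws : List String) (minN : Nat) : List Nat :=
  (List.range (ws.length / 2 + 1 - minN)).map (fun k => minN + k)

-- Source B's `for size in ...: ... if len(rest) + 2*size <= len(ws): ... break`.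
def pvBFind (ws : List String) : List Nat → Option (List String × List String)
  | [] => none
  | s :: more =>
    let phrase := ws.take s
    let rest := pvStrip phrase s (ws.drop s)
    if rest.length + 2 * s ≤ ws.length then some (phrase, rest) else pvBFind ws more

-- Source B's outer `while ws:` loop over the shrinking suffix; fuel for totality only.
def pvBLoop (minN : Nat) : Nat → List String → List String → List String
  | 0, _, out => out
  | _+1, [], out => out
  | fuel+1, w0 :: tl, out =>
    match pvBFind (w0 :: tl) (pvBSizes (w0 :: tl) minN) with
    | some (phrase, rest) => pvBLoop minN fuel rest (out ++ phrase)
    | none => pvBLoop minN fuel tl (out ++ [w0])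

def remove_repeated_phrases_alt (text : String) (min_phrase_len : Int) : String :=
  let words := PySem.Str.split₀ text
  PySem.Str.join " " (pvBLoop min_phrase_len.toNat (words.length + 1) words [])

-- ===== PRECONDITION & SPEC =====
-- A never terminates when min_phrase_len ≤ 0 and the text contains at least one word (the
-- candidate size 0 makes A's inner comparison `[] == []` loop forever); Pre_ excludes exactly
-- those diverging inputs and nothing on which A returns.
def Pre_remove_repeated_phrases (text : String) (min_phrase_len : Int) : Prop :=
  1 ≤ min_phrase_len ∨ PySem.Str.split₀ text = []
instance (text : String) (min_phrase_len : Int) : Decidable (Pre_remove_repeated_phrases text min_phrase_len) := by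
  unfold Pre_remove_repeated_phrases; infer_instance

def pvWitness_remove_repeated_phrases : String × Int := ("go stop go stop end", 2)

def Spec_remove_repeated_phrases (text : String) (min_phrase_len : Int) (out : String) : Prop := out = remove_repeated_phrases_alt text min_phrase_len
instance (text : String) (min_phrase_len : Int) (out : String) : Decidable (Spec_remove_repeated_phrases text min_phrase_len out) := by unfold Spec_remove_repeated_phrases; infer_instance

-- ===== CLAIM (what is proved, stated in full; the proofs are below) =====
def Claim_equal_remove_repeated_phrases : Prop := ∀ (text : String) (min_phrase_len : Int), Dom_remove_repeated_phrases text min_phrase_len → Pre_remove_repeated_phrases text min_phrase_len → Spec_remove_repeated_phrases text min_phrase_len (remove_repeated_phrases text min_phrase_len)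

-- ===== LEMMAS AND PROOFS =====

-- A's repeat counter and B's strip loop are the same scan: each step of pvARepeat
-- compares the block words[i+s*r : i+s*(r+1)] with the phrase, which is exactly
-- `(w.drop (i+s*r)).take s = phrase`, the condition of one pvStrip step.
theorem pvRepStrip (w : List String) (i s : Nat) (hs : 1 ≤ s) (h2 : i + 2 * s ≤ w.length) :
    ∀ (fuel r : Nat), 1 ≤ r → i + s * r ≤ w.length → w.length < i + s * r + s * fuel →
    ∃ rN : Nat,
      pvARepeat w (i : Int) (s : Int) ((w.drop i).take s) fuel (r : Int) = (rN : Int) ∧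
      r ≤ rN ∧ i + s * rN ≤ w.length ∧
      pvStrip ((w.drop i).take s) s (w.drop (i + s * r)) = w.drop (i + s * rN) := by
  intro fuel
  induction fuel with
  | zero => intro r _ h1 hfuel; exfalso; omega
  | succ fuel ih =>
    intro r hr h1 hfuel
    have hph : ((w.drop i).take s).length = s := by
      simp only [List.length_take, List.length_drop]; omega
    have hcast1 : (i : Int) + (s : Int) * (r : Int) = ((i + s * r : Nat) : Int) := by push_cast; ring
    have hcast2 : (i : Int) + (s : Int) * ((r : Int) + 1) = ((i + s * r : Nat) : Int) + ((s : Nat) : Int) := by push_cast; ring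
    rw [pvARepeat, hcast1, hcast2, PySem.List.slice_natCast_add]
    by_cases hc : (w.drop (i + s * r)).take s = (w.drop i).take s
    · -- matched block: one more strip step, one more repeat
      have hlen : s ≤ w.length - (i + s * r) := by
        have := congrArg List.length hc
        simp only [List.length_take, List.length_drop] at this
        omega
      have hne : w.drop (i + s * r) ≠ [] := by
        intro hnil
        rw [hnil] at hc
        simp only [List.take_nil] at hc
        have := congrArg List.length hc
        rw [hph] at this
        simp at this; omega
      rw [if_pos hc, pvStrip, dif_pos ⟨hne, by omega, hc⟩]
      have hdd : (w.drop (i + s * r)).drop s = w.drop (i + s * (r + 1)) := by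
        rw [List.drop_drop]
        congr 1
        ring
      have hrcast : (r : Int) + 1 = ((r + 1 : Nat) : Int) := by push_cast; ring
      rw [hrcast, hdd]
      have hsr : s * (r + 1) = s * r + s := by ring
      have hsf : s * (fuel + 1) = s * fuel + s := by ring
      obtain ⟨rN, hA, hle, hb, hstrip⟩ := ih (r + 1) (by omega) (by omega) (by omega)
      exact ⟨rN, hA, by omega, hb, hstrip⟩
    · -- first mismatch: both stop here
      rw [if_neg hc, pvStrip, dif_neg (by rintro ⟨-, -, h⟩; exact hc h)]
      exact ⟨r, rfl, le_refl r, h1, rfl⟩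

-- per-size search: A's pvAFind over the Int size list agrees with B's pvBFind over the
-- corresponding Nat size list on the suffix w.drop i.
theorem pvFindEq (w : List String) (i : Nat) :
    ∀ sizesN : List Nat, (∀ s ∈ sizesN, 1 ≤ s ∧ i + 2 * s ≤ w.length) →
    (pvAFind w (i : Int) (sizesN.map (fun (k : Nat) => (k : Int))) = none ∧
       pvBFind (w.drop i) sizesN = none) ∨
    (∃ pre i', i < i' ∧ i' ≤ w.length ∧
       pvAFind w (i : Int) (sizesN.map (fun (k : Nat) => (k : Int))) = some (pre, (i' : Int)) ∧
       pvBFind (w.drop i) sizesN = some (pre, w.drop i')) := by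
  intro sizesN
  induction sizesN with
  | nil => intro _; left; exact ⟨rfl, rfl⟩
  | cons s more ih =>
    intro h
    obtain ⟨hs1, h2⟩ := h s List.mem_cons_self
    have hfuel : w.length < i + s * 1 + s * (w.length + 1) := by
      have := Nat.mul_le_mul_right (w.length + 1) hs1
      omega
    obtain ⟨rN, hA, hle, hb, hstrip⟩ := pvRepStrip w i s hs1 h2 (w.length + 1) 1 (le_refl 1) (by omega) hfuel
    have hdd : (w.drop i).drop s = w.drop (i + s * 1) := by
      rw [List.drop_drop]; congr 1; omega
    have hA : pvARepeat w (i : Int) (s : Int) ((w.drop i).take s) (w.length + 1) 1 = (rN : Int) := by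
      exact_mod_cast hA
    simp only [List.map_cons, pvAFind, pvBFind, PySem.List.slice_natCast_add, hdd, hstrip, hA]
    have hLd : (w.drop (i + s * rN)).length = w.length - (i + s * rN) := by
      simp [List.length_drop]
    have hLi : (w.drop i).length = w.length - i := by simp [List.length_drop]
    by_cases h2r : 2 ≤ rN
    · have hmul : s * 2 ≤ s * rN := Nat.mul_le_mul_left s h2r
      rw [if_pos (by exact_mod_cast (by omega : (1 : Int) < (rN : Int))),
          if_pos (by rw [hLd, hLi]; omega)]
      right
      refine ⟨(w.drop i).take s, i + s * rN, by omega, hb, ?_, rfl⟩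
      rw [show (i : Int) + (s : Int) * (rN : Int) = ((i + s * rN : Nat) : Int) from by push_cast; ring]
    · have hr1 : rN = 1 := by omega
      rw [if_neg (by exact_mod_cast (by omega : ¬ (1 : Int) < (rN : Int))),
          if_neg (by rw [hLd, hLi, hr1]; omega)]
      exact ih (fun s' hs' => h s' (List.mem_cons_of_mem _ hs'))

-- A's candidate-size range equals B's, cast to Int.
theorem pvSizesEq (w : List String) (i : Nat) (minI : Int) (hm : 1 ≤ minI) (hi : i ≤ w.length) :
    PySem.List.pyRange minI (PySem.Int.floordiv ((w.length : Int) - (i : Int)) 2 + 1) 1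
      = (pvBSizes (w.drop i) minI.toNat).map (fun (k : Nat) => (k : Int)) := by
  have hsub : (w.length : Int) - (i : Int) = ((w.length - i : Nat) : Int) := by omega
  rw [hsub, show (2 : Int) = ((2 : Nat) : Int) from rfl, PySem.Int.floordiv_natCast, PySem.List.pyRange_one, pvBSizes]
  simp only [List.length_drop, List.map_map]
  have ht : ((((w.length - i) / 2 : Nat) : Int) + 1 - minI).toNat = (w.length - i) / 2 + 1 - minI.toNat := by
    omega
  rw [ht]
  apply List.map_congr_left
  intro k _
  simp only [Function.comp_apply]
  push_cast
  omega

-- lockstep of the two outer loops: A at index i equals B on the suffix w.drop i.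
theorem pvLoopEq (w : List String) (minI : Int) (hm : 1 ≤ minI) :
    ∀ (fuel i : Nat) (res : List String), i ≤ w.length →
      pvALoop w minI fuel (i : Int) res = pvBLoop minI.toNat fuel (w.drop i) res := by
  intro fuel
  induction fuel with
  | zero =>
    intro i res _
    rw [pvALoop, pvBLoop]
  | succ fuel ih =>
    intro i res hi
    rw [pvALoop]
    by_cases hlt : i < w.length
    · rw [if_pos (by exact_mod_cast hlt)]
      obtain ⟨w0, tl, hwt⟩ := List.exists_cons_of_ne_nil
        (by rw [ne_eq, List.drop_eq_nil_iff]; omega : w.drop i ≠ [])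
      have hprop : ∀ s ∈ pvBSizes (w.drop i) minI.toNat, 1 ≤ s ∧ i + 2 * s ≤ w.length := by
        intro s hsmem
        rw [pvBSizes, List.mem_map] at hsmem
        obtain ⟨k, hk, rfl⟩ := hsmem
        rw [List.mem_range, List.length_drop] at hk
        have hhalf : 2 * ((w.length - i) / 2) ≤ w.length - i := by omega
        omega
      rw [pvSizesEq w i minI hm (by omega)]
      rcases pvFindEq w i (pvBSizes (w.drop i) minI.toNat) hprop with ⟨hAn, hBn⟩ | ⟨pre, i', hii', hi'le, hAs, hBs⟩
      · rw [hwt] at hAn hBn ⊢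
        rw [pvBLoop, hBn, hAn]
        have hget : PySem.List.pyGetD w (i : Int) "" = w0 := by
          rw [PySem.List.pyGetD_natCast]
          have h0 : w[i]? = some w0 := by
            have h1 := congrArg (fun l => l[0]?) hwt
            simpa [List.getElem?_drop] using h1
          simp [List.getD, h0]
        have htl : w.drop (i + 1) = tl := by
          have h1 := congrArg (List.drop 1) hwt
          rw [List.drop_drop] at h1
          simpa [Nat.add_comm] using h1
        rw [hget, show ((i : Int) + 1) = ((i + 1 : Nat) : Int) from by push_cast; ring]
        have h2 := ih (i + 1) (res ++ [w0]) (by omega)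
        rw [htl] at h2
        exact h2
      · rw [hwt] at hAs hBs ⊢
        rw [pvBLoop, hBs, hAs]
        exact ih i' (res ++ pre) hi'le
    · rw [if_neg (by exact_mod_cast hlt), List.drop_eq_nil_of_le (by omega), pvBLoop]

-- ===== VERDICT (by name: the statement is the Claim_ definition above) =====
theorem remove_repeated_phrases_spec : Claim_equal_remove_repeated_phrases := by
  intro text minLen _ hpre
  unfold Spec_remove_repeated_phrases remove_repeated_phrases remove_repeated_phrases_alt
  rcases hpre with hmin | hempty
  · have := pvLoopEq (PySem.Str.split₀ text) minLen hmin ((PySem.Str.split₀ text).length + 1) 0 [] (by omega)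
    rw [List.drop_zero] at this
    exact congrArg (PySem.Str.join " ") (by exact_mod_cast this)
  · rw [hempty]
    rfl
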